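-- pv_equiv track=rewrite | github.com/eeshanesb/PatchTST_FeatureSelector | src/patchtst_featureselect/core.py | build_feature_combinations
-- ===== SOURCE A (Python) =====
-- import itertools
-- from typing import Callable, Dict, Iterable, List, Sequence, Tuple
--
-- def build_feature_combinations(
--     candidates: Sequence[str],
--     max_size: int | None,
-- ) -> List[Tuple[str, ...]]:
--     if not candidates:
--         return [tuple()]
--     cap = max_size if max_size is not None else len(candidates)
--     cap = min(cap, len(candidates))
--     combos: List[Tuple[str, ...]] = [tuple()]
--     for size in range(1, cap + 1):
--         combos.extend(itertools.combinations(candidates, size))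
--     return combos
-- ===== SOURCE B (Python) =====
-- def build_feature_combinations(candidates, max_size):
--     # Level-by-level frontier expansion instead of one itertools.combinations call per size.
--     if not candidates:
--         return [tuple()]
--     n = len(candidates)
--     cap = n if max_size is None else min(max_size, n)
--     combos = [tuple()]
--     frontier = [(tuple(), tuple(candidates))]
--     for _ in range(cap):
--         new_frontier = []
--         for combo, rest in frontier:
--             for i, y in enumerate(rest):
--                 new_frontier.append((combo + (y,), rest[i + 1:]))
--         frontier = new_frontier
--         combos.extend(c for c, _ in new_frontier)
--     return combos
-- ===== Notes on version B (the rewrite author's own statement) =====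
-- stated objective: alternative
-- what changed: Replaces the per-size itertools.combinations calls with an incremental level-by-level expansion: a frontier of (combination, remaining-suffix) pairs is extended one element at a time, each level appended to the output.
import Mathlib
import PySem

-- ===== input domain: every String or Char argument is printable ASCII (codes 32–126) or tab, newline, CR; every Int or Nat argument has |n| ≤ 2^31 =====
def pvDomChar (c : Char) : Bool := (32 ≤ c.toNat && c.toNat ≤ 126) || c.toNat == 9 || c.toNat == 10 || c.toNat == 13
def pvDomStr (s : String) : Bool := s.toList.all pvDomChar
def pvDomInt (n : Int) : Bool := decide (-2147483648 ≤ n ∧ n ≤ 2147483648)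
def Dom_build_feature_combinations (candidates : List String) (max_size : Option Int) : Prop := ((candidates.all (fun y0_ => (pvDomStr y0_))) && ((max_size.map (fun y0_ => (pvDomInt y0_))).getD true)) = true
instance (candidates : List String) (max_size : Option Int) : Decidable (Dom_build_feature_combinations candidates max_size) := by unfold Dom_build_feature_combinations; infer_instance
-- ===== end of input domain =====

-- B enumerates subsets level by level via a frontier of (combination, remaining suffix) pairs,
-- instead of A's one itertools.combinations call per size; same values, same order, similar cost.

-- ===== PORT A =====
-- exact hand port of itertools.combinations(xs, k): tuples in lexicographic order of index sets
def pyCombos (xs : List String) (k : Nat) : List (List String) :=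
  match xs, k with
  | _, 0 => [[]]
  | [], _ + 1 => []
  | x :: rest, k + 1 => (pyCombos rest k).map (fun c => x :: c) ++ pyCombos rest (k + 1)

def build_feature_combinations (candidates : List String) (max_size : Option Int) : List (List String) :=
  if candidates = [] then [[]]
  else
    let n : Int := candidates.length
    let cap0 : Int := match max_size with | none => n | some m => m
    let cap : Int := min cap0 n
    (PySem.List.pyRange 1 (cap + 1) 1).foldl
      (fun combos size => combos ++ pyCombos candidates size.toNat) [[]]

-- ===== PORT B =====
-- inner loop 'for i, y in enumerate(rest)': extend combo with y, keep the suffix rest[i+1:]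
def pvExtendOne (combo : List String) : List String → List (List String × List String)
  | [] => []
  | y :: ys => (combo ++ [y], ys) :: pvExtendOne combo ys

-- middle loop 'for combo, rest in frontier'
def pvLevelStep (fr : List (List String × List String)) : List (List String × List String) :=
  fr.flatMap (fun p => pvExtendOne p.1 p.2)

def build_feature_combinations_alt (candidates : List String) (max_size : Option Int) : List (List String) :=
  if candidates = [] then [[]]
  else
    let n : Int := candidates.length
    let cap : Int := match max_size with | none => n | some m => min m n
    let res := (PySem.List.pyRange 0 cap 1).foldl
      (fun (st : List (List String) × List (List String × List String)) _ =>
        let nf := pvLevelStep st.2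
        (st.1 ++ nf.map Prod.fst, nf))
      ([[]], [([], candidates)])
    res.1

-- ===== PRECONDITION & SPEC =====
def Spec_build_feature_combinations (candidates : List String) (max_size : Option Int) (out : List (List String)) : Prop := out = build_feature_combinations_alt candidates max_size
instance (candidates : List String) (max_size : Option Int) (out : List (List String)) : Decidable (Spec_build_feature_combinations candidates max_size out) := by unfold Spec_build_feature_combinations; infer_instance

-- ===== CLAIM (what is proved, stated in full; the proofs are below) =====
def Claim_equal_build_feature_combinations : Prop := ∀ (candidates : List String) (max_size : Option Int), Dom_build_feature_combinations candidates max_size → Spec_build_feature_combinations candidates max_size (build_feature_combinations candidates max_size)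

-- ===== LEMMAS AND PROOFS =====

-- frontier after j iterations of B's outer loop
def pvFr (xs : List String) : Nat → List (List String × List String)
  | 0 => [([], xs)]
  | j + 1 => pvLevelStep (pvFr xs j)

-- B's one-iteration state transformer
def pvStepB (st : List (List String) × List (List String × List String)) :
    List (List String) × List (List String × List String) :=
  let nf := pvLevelStep st.2
  (st.1 ++ nf.map Prod.fst, nf)

-- accumulated output after K levels
def pvAcc (xs : List String) : Nat → List (List String)
  | 0 => [[]]
  | k + 1 => pvAcc xs k ++ pyCombos xs (k + 1)

theorem pvExtendOne_cons (x : String) (c : List String) (ys : List String) :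
    pvExtendOne (x :: c) ys = (pvExtendOne c ys).map (fun p => (x :: p.1, p.2)) := by
  induction ys with
  | nil => rfl
  | cons y ys ih => simp [pvExtendOne, ih]

theorem pvLevelStep_append (a b : List (List String × List String)) :
    pvLevelStep (a ++ b) = pvLevelStep a ++ pvLevelStep b := by
  simp [pvLevelStep]

theorem pvLevelStep_mapCons (x : String) (fr : List (List String × List String)) :
    pvLevelStep (fr.map (fun p => (x :: p.1, p.2))) =
      (pvLevelStep fr).map (fun p => (x :: p.1, p.2)) := by
  induction fr with
  | nil => rfl
  | cons p fr ih =>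
      simp only [List.map_cons, pvLevelStep, List.flatMap_cons] at *
      rw [ih, pvExtendOne_cons]
      simp

theorem pvFr_nil (j : Nat) : pvFr ([] : List String) (j + 1) = [] := by
  induction j with
  | zero => rfl
  | succ j ih => show pvLevelStep (pvFr [] (j + 1)) = []; rw [ih]; rfl

theorem pvFr_cons (xs : List String) (x : String) (j : Nat) :
    pvFr (x :: xs) (j + 1) =
      (pvFr xs j).map (fun p => (x :: p.1, p.2)) ++ pvFr xs (j + 1) := by
  induction j with
  | zero => simp [pvFr, pvLevelStep, pvExtendOne]
  | succ j ih =>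
      show pvLevelStep (pvFr (x :: xs) (j + 1)) = _
      rw [ih, pvLevelStep_append, pvLevelStep_mapCons]
      rfl

-- the frontier at level j carries exactly the size-j combinations, in itertools order
theorem pvFr_fst (xs : List String) (j : Nat) :
    (pvFr xs j).map Prod.fst = pyCombos xs j := by
  induction xs generalizing j with
  | nil =>
      cases j with
      | zero => rfl
      | succ j => simp [pvFr_nil, pyCombos]
  | cons x xs ih =>
      cases j with
      | zero => rfl
      | succ j =>
          rw [pvFr_cons]
          simp only [List.map_append, List.map_map]
          show (pvFr xs j).map (Prod.fst ∘ fun p => (x :: p.1, p.2)) ++ _ = _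
          have : (Prod.fst ∘ fun p : List String × List String => (x :: p.1, p.2)) =
              (fun c => x :: c) ∘ Prod.fst := rfl
          rw [this, ← List.map_map, ih, ih]
          rfl

-- a foldl whose function ignores the elements is an iterate
theorem pvFoldl_const {α β : Type} (f : β → β) (l : List α) (init : β) :
    l.foldl (fun s _ => f s) init = f^[l.length] init := by
  induction l generalizing init with
  | nil => rfl
  | cons a l ih => simp [List.foldl_cons, ih, Function.iterate_succ_apply]

-- B's loop state after K iterations
theorem pvB_loop (xs : List String) (K : Nat) :
    pvStepB^[K] ([[]], [([], xs)]) = (pvAcc xs K, pvFr xs K) := by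
  induction K with
  | zero => rfl
  | succ K ih =>
      rw [Function.iterate_succ_apply', ih]
      show (pvAcc xs K ++ (pvLevelStep (pvFr xs K)).map Prod.fst,
            pvLevelStep (pvFr xs K)) = _
      have h : pvLevelStep (pvFr xs K) = pvFr xs (K + 1) := rfl
      rw [h, pvFr_fst]
      rfl

-- A's loop over range(1, K+1)
theorem pvA_loop (xs : List String) (K : Nat) :
    (PySem.List.pyRange 1 ((K : Int) + 1) 1).foldl
      (fun combos size => combos ++ pyCombos xs size.toNat) [[]] = pvAcc xs K := by
  induction K with
  | zero => rfl
  | succ K ih =>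
      have hcast : (((K + 1 : Nat)) : Int) + 1 = ((K : Int) + 1) + 1 := by push_cast; ring
      rw [hcast, PySem.List.pyRange_one_succ_right (a := 1) (b := (K : Int) + 1) (by omega),
        List.foldl_append, ih]
      show pvAcc xs K ++ pyCombos xs ((K : Int) + 1).toNat = _
      have : ((K : Int) + 1).toNat = K + 1 := by omega
      rw [this]
      rfl

-- the two loop bodies agree for any common cap
theorem pvMain (xs : List String) (cap : Int) :
    (PySem.List.pyRange 1 (cap + 1) 1).foldl
      (fun combos size => combos ++ pyCombos xs size.toNat) [[]] =
    ((PySem.List.pyRange 0 cap 1).foldl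
      (fun (st : List (List String) × List (List String × List String)) _ =>
        (st.1 ++ (pvLevelStep st.2).map Prod.fst, pvLevelStep st.2))
      ([[]], [([], xs)])).1 := by
  by_cases hpos : 0 ≤ cap
  · have hK : ((cap.toNat : Int)) = cap := Int.toNat_of_nonneg hpos
    have hA : PySem.List.pyRange 1 (cap + 1) 1 =
        PySem.List.pyRange 1 ((cap.toNat : Int) + 1) 1 := by rw [hK]
    rw [hA, pvA_loop]
    have hfold := pvFoldl_const pvStepB (PySem.List.pyRange 0 cap 1)
      ([[]], [([], xs)])
    have hlen : (PySem.List.pyRange 0 cap 1).length = cap.toNat := by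
      rw [PySem.List.length_pyRange_one]; omega
    have hB : (PySem.List.pyRange 0 cap 1).foldl
        (fun (st : List (List String) × List (List String × List String)) _ =>
          (st.1 ++ (pvLevelStep st.2).map Prod.fst, pvLevelStep st.2))
        ([[]], [([], xs)]) = (pvAcc xs cap.toNat, pvFr xs cap.toNat) := by
      calc _ = pvStepB^[(PySem.List.pyRange 0 cap 1).length] ([[]], [([], xs)]) := hfold
        _ = _ := by rw [hlen, pvB_loop]
    rw [hB]
  · rw [PySem.List.pyRange_one_eq_nil (a := 1) (b := cap + 1) (by omega),
      PySem.List.pyRange_one_eq_nil (a := 0) (b := cap) (by omega)]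
    rfl

theorem build_feature_combinations_spec : Claim_equal_build_feature_combinations := by
  intro candidates max_size _
  unfold Spec_build_feature_combinations build_feature_combinations build_feature_combinations_alt
  by_cases hc : candidates = []
  · simp [hc]
  · simp only [if_neg hc]
    cases max_size with
    | none => simpa using pvMain candidates (candidates.length : Int)
    | some m => simpa using pvMain candidates (min m (candidates.length : Int))
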